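-- pv_equiv track=rewrite | github.com/MinHyungChae/Programmers | Level_2/전화번호 목록/solution_v1.py | solution
-- ===== SOURCE A (Python) =====
-- def solution(phone_book):
--     answer = True
--     # 문자열의 길이 순으로 배열 정렬
--     phone_book.sort(key = len)
--
--     for i in range(0, len(phone_book)):
--         for j in range(i+1, len(phone_book)):
--             keyword = str(phone_book[i])
--             if (keyword in phone_book[j]):
--                 answer = False
--                 break
--     return answer
-- ===== SOURCE B (Python) =====
-- def solution(phone_book):
--     # Hash-set of all numbers, then scan every substring of every entry:
--     # a duplicate entry, or a slice of some entry equal to a *different* entry,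
--     # means one number contains another.
--     seen = set()
--     for s in phone_book:
--         if s in seen:
--             return False
--         seen.add(s)
--     for t in phone_book:
--         n = len(t)
--         for i in range(n + 1):
--             for j in range(i, n + 1):
--                 sub = t[i:j]
--                 if sub != t and sub in seen:
--                     return False
--     return True
-- ===== Notes on version B (the rewrite author's own statement) =====
-- stated objective: faster
-- what changed: Replaces A's sort-by-length plus all-pairs substring scan (which always visits all O(n^2) pairs, the flag never exits the outer loop) with a hash set of all numbers queried for every substring of every entry with early return, O(n*L^2) set lookups instead of O(n^2) pair scans; B does not mutate the input list, which A sorts in place.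
import Mathlib
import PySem

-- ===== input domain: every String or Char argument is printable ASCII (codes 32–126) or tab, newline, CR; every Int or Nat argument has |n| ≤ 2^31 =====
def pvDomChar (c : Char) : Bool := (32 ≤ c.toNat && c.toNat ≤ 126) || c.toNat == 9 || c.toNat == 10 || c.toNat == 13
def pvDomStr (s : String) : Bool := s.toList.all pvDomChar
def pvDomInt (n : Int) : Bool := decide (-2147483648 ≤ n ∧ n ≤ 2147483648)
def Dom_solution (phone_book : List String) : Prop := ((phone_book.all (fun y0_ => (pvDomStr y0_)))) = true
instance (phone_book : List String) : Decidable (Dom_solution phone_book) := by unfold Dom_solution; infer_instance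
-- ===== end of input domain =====

-- B replaces A's sort-by-length + all-pairs substring scan with a hash set of all
-- numbers queried for each substring of each entry (early return); equivalence is
-- about the RETURN value only: A sorts phone_book in place, B does not mutate it.

-- ===== PORT A =====
-- inner 'for j' loop: sets answer=False and breaks at the first hit, else keeps answer
def solutionInner (keyword : String) : List String → Bool → Bool
  | [], answer => answer
  | t :: ts, answer =>
      if PySem.Str.isIn keyword t then false else solutionInner keyword ts answer

-- outer 'for i' loop over the length-sorted list
def solutionOuter : List String → Bool → Bool
  | [], answer => answer
  | s :: rest, answer => solutionOuter rest (solutionInner s rest answer)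

def solution (phone_book : List String) : Bool :=
  solutionOuter (PySem.List.sorted phone_book (fun s => PySem.Str.len s) false) true

-- ===== PORT B =====
-- first loop: build 'seen'; 'none' = early 'return False' on a duplicate
def altSeenLoop : List String → PySem.Set String → Option (PySem.Set String)
  | [], seen => some seen
  | s :: rest, seen =>
      if PySem.Set.contains seen s then none
      else altSeenLoop rest (PySem.Set.add seen s)

-- innermost 'for j' loop: false = 'return False'
def altJLoop (t : String) (seen : PySem.Set String) (i : Int) : List Int → Bool
  | [] => true
  | j :: js =>
      let sub := PySem.Str.slice t (some i) (some j)
      if sub ≠ t ∧ PySem.Set.contains seen sub then false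
      else altJLoop t seen i js

-- 'for i' loop
def altILoop (t : String) (seen : PySem.Set String) : List Int → Bool
  | [] => true
  | i :: is =>
      altJLoop t seen i (PySem.List.pyRange i (PySem.Str.len t + 1)) &&
        altILoop t seen is

-- 'for t' loop
def altTLoop (seen : PySem.Set String) : List String → Bool
  | [] => true
  | t :: ts =>
      altILoop t seen (PySem.List.pyRange 0 (PySem.Str.len t + 1)) && altTLoop seen ts

def solution_alt (phone_book : List String) : Bool :=
  match altSeenLoop phone_book PySem.Set.empty with
  | none => false
  | some seen => altTLoop seen phone_book

-- ===== PRECONDITION & SPEC =====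
def Spec_solution (phone_book : List String) (out : Bool) : Prop := out = solution_alt phone_book
instance (phone_book : List String) (out : Bool) : Decidable (Spec_solution phone_book out) := by unfold Spec_solution; infer_instance

-- ===== CLAIM (what is proved, stated in full; the proofs are below) =====
def Claim_equal_solution : Prop := ∀ (phone_book : List String), Dom_solution phone_book → Spec_solution phone_book (solution phone_book)

-- ===== LEMMAS AND PROOFS =====

-- the semantic condition both programs answer 'false' on
def Qbad (pb : List String) : Prop :=
  ¬ pb.Nodup ∨ ∃ s ∈ pb, ∃ t ∈ pb, s ≠ t ∧ PySem.Str.isIn s t = true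

lemma solutionInner_eq (kw : String) (l : List String) (ans : Bool) :
    solutionInner kw l ans = if l.any (fun t => PySem.Str.isIn kw t) then false else ans := by
  induction l with
  | nil => simp [solutionInner]
  | cons t ts ih =>
      rw [solutionInner, ih, List.any_cons]
      by_cases h : PySem.Str.isIn kw t = true
      · rw [if_pos h, if_pos (by rw [h]; rfl)]
      · rw [if_neg h]
        have : (PySem.Str.isIn kw t || ts.any fun t => PySem.Str.isIn kw t) =
            (ts.any fun t => PySem.Str.isIn kw t) := by
          rw [Bool.eq_false_iff.mpr h, Bool.false_or]
        rw [this]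

lemma solutionOuter_eq_false_iff (l : List String) :
    solutionOuter l true = false ↔
      ¬ l.Pairwise (fun a b => PySem.Str.isIn a b = false) := by
  suffices H : ∀ (l : List String) (ans : Bool),
      solutionOuter l ans = false ↔
        (ans = false ∨ ¬ l.Pairwise (fun a b => PySem.Str.isIn a b = false)) by
    rw [H]; simp
  intro l
  induction l with
  | nil => intro ans; simp [solutionOuter]
  | cons s rest ih =>
      intro ans
      rw [solutionOuter, solutionInner_eq, ih]
      by_cases h : (rest.any fun t => PySem.Str.isIn s t) = true
      · rw [if_pos h]
        have hnp : ¬ List.Pairwise (fun a b => PySem.Str.isIn a b = false) (s :: rest) := by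
          rw [List.pairwise_cons]
          rintro ⟨h1, _⟩
          obtain ⟨t, ht, hst⟩ := List.any_eq_true.mp h
          have h2 := h1 t ht
          have h3 : PySem.Str.isIn s t = true := by simpa using hst
          rw [h3] at h2
          exact Bool.noConfusion h2
        constructor
        · intro _; exact Or.inr hnp
        · intro _; exact Or.inl rfl
      · rw [if_neg h]
        have hall : ∀ t ∈ rest, PySem.Str.isIn s t = false := by
          intro t ht
          by_contra hc
          exact h (List.any_eq_true.mpr ⟨t, ht, by simpa using eq_true_of_ne_false hc⟩)
        have hPW : List.Pairwise (fun a b => PySem.Str.isIn a b = false) (s :: rest) ↔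
            List.Pairwise (fun a b => PySem.Str.isIn a b = false) rest := by
          rw [List.pairwise_cons]
          exact ⟨fun ⟨_, h2⟩ => h2, fun h2 => ⟨hall, h2⟩⟩
        rw [hPW]

lemma not_nodup_iff_getElem (l : List String) :
    ¬ l.Nodup ↔ ∃ i j : Nat, ∃ hi : i < l.length, ∃ hj : j < l.length,
      i < j ∧ l[i] = l[j] := by
  rw [List.Nodup, List.pairwise_iff_getElem]
  constructor
  · intro h
    by_contra hc
    push_neg at hc
    exact h (fun i j hi hj hij => hc i j hi hj hij)
  · rintro ⟨i, j, hi, hj, hij, heq⟩ h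
    exact h i j hi hj hij heq

lemma infix_self_toList (s : String) : PySem.Str.isIn s s = true := by
  rw [PySem.Str.isIn_iff_infix]

lemma len_lt_of_infix_ne {s t : String}
    (h : s.toList <:+: t.toList) (hne : s ≠ t) : PySem.Str.len s < PySem.Str.len t := by
  have hle : s.toList.length ≤ t.toList.length := h.length_le
  have hlt : s.toList.length < t.toList.length := by
    rcases lt_or_eq_of_le hle with h' | h'
    · exact h'
    · exfalso
      exact hne (by
        have := h.eq_of_length h'
        exact String.ext (by simpa using this))
  simp only [PySem.Str.len_eq]
  exact_mod_cast hlt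

-- A answers false exactly on Qbad
lemma solution_eq_false_iff (pb : List String) : solution pb = false ↔ Qbad pb := by
  classical
  have hperm : (PySem.List.sorted pb (fun s => PySem.Str.len s) false).Perm pb :=
    PySem.List.sorted_perm pb _ false
  rw [solution, solutionOuter_eq_false_iff]
  constructor
  · intro hnp
    rw [List.pairwise_iff_getElem] at hnp
    push_neg at hnp
    obtain ⟨i, j, hi, hj, hij, hR⟩ := hnp
    have hR' : PySem.Str.isIn (PySem.List.sorted pb (fun s => PySem.Str.len s) false)[i]
        (PySem.List.sorted pb (fun s => PySem.Str.len s) false)[j] = true :=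
      eq_true_of_ne_false hR
    by_cases heq : (PySem.List.sorted pb (fun s => PySem.Str.len s) false)[i] =
        (PySem.List.sorted pb (fun s => PySem.Str.len s) false)[j]
    · left
      rw [← hperm.nodup_iff, not_nodup_iff_getElem]
      exact ⟨i, j, hi, hj, hij, heq⟩
    · right
      exact ⟨_, hperm.mem_iff.mp (List.getElem_mem hi),
             _, hperm.mem_iff.mp (List.getElem_mem hj), heq, hR'⟩
  · rintro (hnd | ⟨s, hs, t, ht, hne, hin⟩)
    · rw [← hperm.nodup_iff, not_nodup_iff_getElem] at hnd
      obtain ⟨i, j, hi, hj, hij, heq⟩ := hnd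
      rw [List.pairwise_iff_getElem]
      intro hp
      have h2 := hp i j hi hj hij
      rw [heq, infix_self_toList] at h2
      exact Bool.noConfusion h2
    · have hlt : PySem.Str.len s < PySem.Str.len t :=
        len_lt_of_infix_ne ((PySem.Str.isIn_iff_infix s t).mp hin) hne
      obtain ⟨i, hi, hsi⟩ := List.getElem_of_mem (hperm.mem_iff.mpr hs)
      obtain ⟨j, hj, htj⟩ := List.getElem_of_mem (hperm.mem_iff.mpr ht)
      rw [List.pairwise_iff_getElem]
      intro hp
      rcases Nat.lt_or_ge i j with hij | hij
      · have h2 := hp i j hi hj hij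
        rw [hsi, htj, hin] at h2
        exact Bool.noConfusion h2
      · have hne' : j ≠ i := by
          intro e
          subst e
          exact hne (hsi.symm.trans htj)
        have hji : j < i := lt_of_le_of_ne (by omega) hne'
        have hmono := PySem.List.key_sorted_getElem_mono pb
          (fun s => PySem.Str.len s) (le_of_lt hji) hi
        simp only [hsi, htj] at hmono
        omega

-- characterisation of B's first loop
lemma altSeenLoop_eq (l : List String) : ∀ (seen : PySem.Set String),
    altSeenLoop l seen =
      if l.Nodup ∧ ∀ x ∈ l, ¬ x ∈ seen then some (l.foldl PySem.Set.add seen) else none := by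
  induction l with
  | nil => intro seen; simp [altSeenLoop]
  | cons s rest ih =>
      intro seen
      rw [altSeenLoop]
      by_cases hc : PySem.Set.contains seen s = true
      · have hs : s ∈ seen := (PySem.Set.contains_iff seen s).mp hc
        rw [if_pos hc, if_neg]
        rintro ⟨_, hall⟩
        exact hall s (by simp) hs
      · have hs : ¬ s ∈ seen := fun h => hc ((PySem.Set.contains_iff seen s).mpr h)
        rw [if_neg hc, ih]
        have hiff : (rest.Nodup ∧ ∀ x ∈ rest, ¬ x ∈ PySem.Set.add seen s) ↔
            ((s :: rest).Nodup ∧ ∀ x ∈ s :: rest, ¬ x ∈ seen) := by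
          simp only [List.nodup_cons, List.mem_cons]
          constructor
          · rintro ⟨hnd, hall⟩
            refine ⟨⟨fun hmem => (hall s hmem) ((PySem.Set.mem_add seen s s).mpr (Or.inr rfl)), hnd⟩, ?_⟩
            rintro x (rfl | hx)
            · exact hs
            · exact fun hmem => (hall x hx) ((PySem.Set.mem_add seen s x).mpr (Or.inl hmem))
          · rintro ⟨⟨hsr, hnd⟩, hall⟩
            refine ⟨hnd, fun x hx hmem => ?_⟩
            rcases (PySem.Set.mem_add seen s x).mp hmem with h | rfl
            · exact hall x (Or.inr hx) h
            · exact hsr hx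
        rw [if_congr hiff rfl rfl]
        split <;> simp [List.foldl_cons]

lemma altJLoop_eq_false_iff (t : String) (seen : PySem.Set String) (i : Int) (js : List Int) :
    altJLoop t seen i js = false ↔
      ∃ j ∈ js, PySem.Str.slice t (some i) (some j) ≠ t ∧
        PySem.Str.slice t (some i) (some j) ∈ seen := by
  induction js with
  | nil => simp [altJLoop]
  | cons j js ih =>
      rw [altJLoop]
      by_cases h : PySem.Str.slice t (some i) (some j) ≠ t ∧
          PySem.Set.contains seen (PySem.Str.slice t (some i) (some j)) = true
      · rw [if_pos h]
        constructor
        · intro _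
          exact ⟨j, List.mem_cons_self .., h.1, (PySem.Set.contains_iff _ _).mp h.2⟩
        · intro _; rfl
      · rw [if_neg h, ih]
        constructor
        · rintro ⟨j', hj', hcond⟩; exact ⟨j', List.mem_cons_of_mem _ hj', hcond⟩
        · rintro ⟨j', hj', hcond⟩
          rcases List.mem_cons.mp hj' with rfl | hj''
          · exact absurd ⟨hcond.1, (PySem.Set.contains_iff _ _).mpr hcond.2⟩ h
          · exact ⟨j', hj'', hcond⟩

lemma altILoop_eq_false_iff (t : String) (seen : PySem.Set String) (is : List Int) :
    altILoop t seen is = false ↔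
      ∃ i ∈ is, ∃ j ∈ PySem.List.pyRange i (PySem.Str.len t + 1),
        PySem.Str.slice t (some i) (some j) ≠ t ∧
          PySem.Str.slice t (some i) (some j) ∈ seen := by
  induction is with
  | nil => simp [altILoop]
  | cons i is ih =>
      rw [altILoop, Bool.and_eq_false_iff, ih, altJLoop_eq_false_iff]
      constructor
      · rintro (⟨j, hj, hc⟩ | ⟨i', hi', hc⟩)
        · exact ⟨i, List.mem_cons_self, j, hj, hc⟩
        · exact ⟨i', List.mem_cons_of_mem _ hi', hc⟩
      · rintro ⟨i', hi', j, hj, hc⟩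
        rcases List.mem_cons.mp hi' with rfl | hi''
        · exact Or.inl ⟨j, hj, hc⟩
        · exact Or.inr ⟨i', hi'', j, hj, hc⟩

-- a slice with 0 ≤ i ≤ j is an infix; conversely every infix arises as such a slice
lemma slice_infix (t : String) (i j : Int) (hi : 0 ≤ i) (hj : 0 ≤ j) :
    (PySem.Str.slice t (some i) (some j)).toList <:+: t.toList := by
  rw [PySem.Str.toList_slice, PySem.Chars.slice_eq_listSlice,
      PySem.List.slice_toNat _ hi hj]
  exact ((List.take_prefix _ _).isInfix).trans (List.drop_suffix _ _).isInfix

lemma infix_eq_slice {s t : String} (h : s.toList <:+: t.toList) :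
    ∃ i j : Int, 0 ≤ i ∧ i ≤ j ∧ j ≤ PySem.Str.len t ∧
      PySem.Str.slice t (some i) (some j) = s := by
  obtain ⟨j0, hpre⟩ := (PySem.Chars.exists_prefix_drop_iff_isIn s.toList t.toList).mpr
    (by rw [← PySem.Str.isIn_iff_infix] at h; simpa using h)
  -- clamp j0 to the length
  set i0 : Nat := min j0 t.toList.length with hi0
  have hdrop : t.toList.drop i0 = t.toList.drop j0 := by
    rcases le_total j0 t.toList.length with hle | hle
    · simp [hi0]
    · rw [hi0, min_eq_right hle, List.drop_eq_nil_of_le hle, List.drop_eq_nil_of_le le_rfl]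
  rw [← hdrop] at hpre
  have hslen : s.toList.length ≤ t.toList.length - i0 := by
    have := hpre.length_le
    simpa [List.length_drop] using this
  refine ⟨(i0 : Int), (i0 : Int) + (s.toList.length : Int), by positivity,
    by omega, ?_, ?_⟩
  · simp only [PySem.Str.len_eq]
    have hi0le : i0 ≤ t.toList.length := min_le_right _ _
    omega
  · apply String.ext
    rw [PySem.Str.toList_slice, PySem.Chars.slice_eq_listSlice,
        PySem.List.slice_natCast_add]
    rw [List.prefix_iff_eq_take] at hpre
    exact hpre.symm

lemma altTLoop_eq_false_iff (seen : PySem.Set String) (l : List String) :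
    altTLoop seen l = false ↔
      ∃ t ∈ l, ∃ s ∈ seen, s ≠ t ∧ s.toList <:+: t.toList := by
  induction l with
  | nil => simp [altTLoop]
  | cons t ts ih =>
      rw [altTLoop, Bool.and_eq_false_iff, ih, altILoop_eq_false_iff]
      constructor
      · rintro (⟨i, hi, j, hj, hne, hmem⟩ | ⟨t', ht', hc⟩)
        · rw [PySem.List.mem_pyRange_one] at hi hj
          exact ⟨t, List.mem_cons_self, _, hmem, hne,
            slice_infix t i j hi.1 (by omega)⟩
        · exact ⟨t', List.mem_cons_of_mem _ ht', hc⟩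
      · rintro ⟨t', ht', s, hs, hne, hinf⟩
        rcases List.mem_cons.mp ht' with rfl | ht''
        · left
          obtain ⟨i, j, h0i, hij, hjl, hslice⟩ := infix_eq_slice hinf
          refine ⟨i, ?_, j, ?_, by rw [hslice]; exact hne, by rw [hslice]; exact hs⟩
          · rw [PySem.List.mem_pyRange_one]
            constructor
            · exact h0i
            · have hlen : (0:Int) ≤ PySem.Str.len t' := by
                simp [PySem.Str.len_eq]
              omega
          · rw [PySem.List.mem_pyRange_one]; omega
        · exact Or.inr ⟨t', ht'', s, hs, hne, hinf⟩

-- B answers false exactly on Qbad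
lemma solution_alt_eq_false_iff (pb : List String) : solution_alt pb = false ↔ Qbad pb := by
  classical
  rw [solution_alt, altSeenLoop_eq]
  by_cases hnd : pb.Nodup ∧ ∀ x ∈ pb, ¬ x ∈ (PySem.Set.empty : PySem.Set String)
  · rw [if_pos hnd]
    have hfold : pb.foldl PySem.Set.add (PySem.Set.empty : PySem.Set String) =
        PySem.Set.ofList pb := (PySem.Set.ofList_eq_foldl pb).symm
    rw [hfold, altTLoop_eq_false_iff]
    unfold Qbad
    constructor
    · rintro ⟨t, ht, s, hs, hne, hinf⟩
      exact Or.inr ⟨s, (PySem.Set.mem_ofList pb s).mp hs, t, ht, hne,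
        (PySem.Str.isIn_iff_infix s t).mpr hinf⟩
    · rintro (h | ⟨s, hs, t, ht, hne, hin⟩)
      · exact absurd hnd.1 h
      · exact ⟨t, ht, s, (PySem.Set.mem_ofList pb s).mpr hs, hne,
          (PySem.Str.isIn_iff_infix s t).mp hin⟩
  · rw [if_neg hnd]
    simp only [Qbad, true_iff]
    left
    intro hc
    exact hnd ⟨hc, by simp [PySem.Set.empty]⟩

-- ===== VERDICT (by name: the statement is the Claim_ definition above) =====
theorem solution_spec : Claim_equal_solution := by
  intro pb _
  unfold Spec_solution
  have ha := solution_eq_false_iff pb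
  have hb := solution_alt_eq_false_iff pb
  cases h1 : solution pb <;> cases h2 : solution_alt pb
  · rfl
  · exact absurd (hb.mpr (ha.mp h1)) (by simp [h2])
  · exact absurd (ha.mpr (hb.mp h2)) (by simp [h1])
  · rfl
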